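-- pv_equiv track=rewrite | github.com/MuthoniGathiithi/Port-Hunter | app/services/liveness_detection.py | group_frames_by_pose
-- ===== SOURCE A (Python) =====
-- from typing import List, Dict, Tuple, Optional
--
-- def group_frames_by_pose(frames: List[Dict]) -> Dict[str, List[str]]:
--     """
--     Group frames by their pose type
--
--     Args:
--         frames: List of frame objects with 'pose_type' and 'frame_data'
--
--     Returns:
--         Dictionary mapping pose types to frame lists
--     """
--     grouped = {
--         'center': [],
--         'tilt_down': [],
--         'turn_right': [],
--         'turn_left': []
--     }
--
--     for frame in frames:
--         pose_type = frame.get('pose_type', '').lower()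
--         frame_data = frame.get('frame_data', '')
--
--         if pose_type in grouped and frame_data:
--             grouped[pose_type].append(frame_data)
--
--     return grouped
-- ===== SOURCE B (Python) =====
-- def group_frames_by_pose(frames):
--     """Bucket-first: build each of the four fixed pose buckets by filtering frames."""
--     keys = ['center', 'tilt_down', 'turn_right', 'turn_left']
--     return {key: [f.get('frame_data', '') for f in frames
--                   if f.get('pose_type', '').lower() == key and f.get('frame_data', '')]
--             for key in keys}
-- ===== Notes on version B (the rewrite author's own statement) =====
-- stated objective: alternative
-- what changed: B builds the result bucket-first: it iterates over the four fixed pose keys and for each filters the frame list once, instead of A's single dispatch pass that appends into a pre-seeded dict.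
import Mathlib
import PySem

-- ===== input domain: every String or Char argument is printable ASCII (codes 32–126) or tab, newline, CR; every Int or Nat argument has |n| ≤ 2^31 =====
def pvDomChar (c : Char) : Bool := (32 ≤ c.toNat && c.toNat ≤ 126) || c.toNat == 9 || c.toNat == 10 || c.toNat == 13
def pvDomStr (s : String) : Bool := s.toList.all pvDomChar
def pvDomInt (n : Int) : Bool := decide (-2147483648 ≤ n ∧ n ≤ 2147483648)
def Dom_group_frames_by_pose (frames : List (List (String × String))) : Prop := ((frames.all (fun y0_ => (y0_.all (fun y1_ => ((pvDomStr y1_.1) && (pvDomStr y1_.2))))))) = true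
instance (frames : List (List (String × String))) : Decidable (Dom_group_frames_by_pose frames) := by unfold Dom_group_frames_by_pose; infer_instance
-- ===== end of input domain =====

-- B groups by iterating over the four fixed pose keys and filtering the frames for each
-- (bucket-first construction) instead of A's single dispatch pass into a dict; objective: alternative.

-- shared transliteration of `frame.get('pose_type','').lower()` and `frame.get('frame_data','')`
def pvPose (frame : List (String × String)) : String :=
  PySem.Str.lower ((PySem.Dict.mk frame).getD "pose_type" "")

def pvData (frame : List (String × String)) : String :=
  (PySem.Dict.mk frame).getD "frame_data" ""

-- ===== PORT A =====
-- loop body of A's `for frame in frames:`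
def pvStepA (d : PySem.Dict String (List String)) (frame : List (String × String)) :
    PySem.Dict String (List String) :=
  if d.contains (pvPose frame) && !(pvData frame == "") then
    d.insert (pvPose frame) (d.getD (pvPose frame) [] ++ [pvData frame])
  else d

def group_frames_by_pose (frames : List (List (String × String))) : List (String × List String) :=
  let grouped : PySem.Dict String (List String) :=
    PySem.Dict.mk [("center", []), ("tilt_down", []), ("turn_right", []), ("turn_left", [])]
  (frames.foldl pvStepA grouped).items

-- ===== PORT B =====
def group_frames_by_pose_alt (frames : List (List (String × String))) : List (String × List String) :=
  ["center", "tilt_down", "turn_right", "turn_left"].map (fun key =>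
    (key, (frames.filter (fun f => pvPose f == key && !(pvData f == ""))).map pvData))

-- ===== PRECONDITION & SPEC =====
def Spec_group_frames_by_pose (frames : List (List (String × String))) (out : List (String × List String)) : Prop := out = group_frames_by_pose_alt frames
instance (frames : List (List (String × String))) (out : List (String × List String)) : Decidable (Spec_group_frames_by_pose frames out) := by unfold Spec_group_frames_by_pose; infer_instance

-- ===== CLAIM (what is proved, stated in full; the proofs are below) =====
def Claim_equal_group_frames_by_pose : Prop := ∀ (frames : List (List (String × String))), Dom_group_frames_by_pose frames → Spec_group_frames_by_pose frames (group_frames_by_pose frames)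

-- ===== LEMMAS AND PROOFS =====

-- A's loop keeps the key set fixed and appends to bucket k exactly the data of
-- frames that B's filter for k selects.
lemma pv_loopA (frames : List (List (String × String))) :
    ∀ (d : PySem.Dict String (List String)) (k : String), k ∈ d.keys →
      (frames.foldl pvStepA d).keys = d.keys ∧
      (frames.foldl pvStepA d).getD k [] =
        d.getD k [] ++ (frames.filter (fun f => pvPose f == k && !(pvData f == ""))).map pvData := by
  induction frames with
  | nil => intro d k _; simp
  | cons f fs ih =>
    intro d k hk
    have hkeys : (pvStepA d f).keys = d.keys := by
      unfold pvStepA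
      split
      · next h =>
        have hc : d.contains (pvPose f) = true := by
          cases hc' : d.contains (pvPose f) <;> simp [hc'] at h ⊢
        exact PySem.Dict.keys_insert_of_contains _ _ hc
      · rfl
    have hk' : k ∈ (pvStepA d f).keys := hkeys ▸ hk
    obtain ⟨ih1, ih2⟩ := ih (pvStepA d f) k hk'
    refine ⟨by simpa [hkeys] using ih1, ?_⟩
    simp only [List.foldl_cons, List.filter_cons]
    rw [ih2]
    by_cases hpk : pvPose f = k
    · by_cases hd : pvData f = ""
      · have : pvStepA d f = d := by unfold pvStepA; simp [hd]
        simp [this, hpk, hd]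
      · have hc : d.contains (pvPose f) = true := by
          rw [hpk]; exact (PySem.Dict.contains_iff_mem_keys d k).mpr hk
        rw [hpk] at hc
        have hstep : pvStepA d f = d.insert k (d.getD k [] ++ [pvData f]) := by
          unfold pvStepA; rw [hpk]; simp [hc, hd]
        rw [hstep, PySem.Dict.getD_insert_self]
        simp [hpk, hd]
    · have hgd : (pvStepA d f).getD k [] = d.getD k [] := by
        unfold pvStepA
        split
        · exact PySem.Dict.getD_insert_of_ne _ _ _ (Ne.symm hpk)
        · rfl
      rw [hgd]
      simp [hpk]

-- ===== VERDICT (by name: the statement is the Claim_ definition above) =====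
theorem group_frames_by_pose_spec : Claim_equal_group_frames_by_pose := by
  intro frames _
  unfold Spec_group_frames_by_pose group_frames_by_pose group_frames_by_pose_alt
  have hmem : ∀ k ∈ (["center", "tilt_down", "turn_right", "turn_left"] : List String),
      k ∈ (PySem.Dict.mk [("center", ([] : List String)), ("tilt_down", []),
            ("turn_right", []), ("turn_left", [])]).keys := by decide
  have hkeys := (pv_loopA frames _ "center" (hmem "center" (by decide))).1
  have hnd : (frames.foldl pvStepA (PySem.Dict.mk [("center", ([] : List String)),
      ("tilt_down", []), ("turn_right", []), ("turn_left", [])])).keys.Nodup := by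
    rw [hkeys]; decide
  rw [PySem.Dict.items_eq_map_keys _ hnd [], hkeys]
  have h := fun k hk => (pv_loopA frames _ k (hmem k hk)).2
  simp only [PySem.Dict.keys_mk, List.map_cons, List.map_nil,
    h "center" (by decide), h "tilt_down" (by decide),
    h "turn_right" (by decide), h "turn_left" (by decide)]
  rfl
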